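-- pv_equiv track=rewrite | github.com/sousajimothy/language_learning | german_pipeline/drills.py | _extract_article_and_noun
-- ===== SOURCE A (Python) =====
-- _ARTICLE_PREFIXES: tuple[str, ...] = ("der ", "die ", "das ")
--
-- def _extract_article_and_noun(de_mit_artikel: str) -> tuple[str, str] | None:
--     """If *de_mit_artikel* starts with a definite article, return ``(article, noun)``.
--
--     ``article`` is the lower-cased article (``"der"``, ``"die"``, or ``"das"``).
--     ``noun`` is the remainder of the string with its original casing preserved.
--     Returns ``None`` when no article is found.
--     """
--     lower = de_mit_artikel.lower()
--     for prefix in _ARTICLE_PREFIXES: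
--         if lower.startswith(prefix):
--             article  = prefix.rstrip()               # "der" / "die" / "das"
--             noun     = de_mit_artikel[len(prefix):]  # original casing kept
--             return article, noun
--     return None
-- ===== SOURCE B (Python) =====
-- def _extract_article_and_noun(de_mit_artikel: str) -> tuple[str, str] | None:
--     """Tokenize at the first space instead of looping over prefixes."""
--     head, sep, tail = de_mit_artikel.partition(" ")
--     article = head.lower()
--     if sep == " " and article in {"der", "die", "das"}:
--         return article, tail
--     return None
-- ===== Notes on version B (the rewrite author's own statement) =====
-- stated objective: idiomatic
-- what changed: Replaces the loop over lower-cased 4-char prefixes with str.partition at the first space plus one set-membership test on the lower-cased first token.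
import Mathlib
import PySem

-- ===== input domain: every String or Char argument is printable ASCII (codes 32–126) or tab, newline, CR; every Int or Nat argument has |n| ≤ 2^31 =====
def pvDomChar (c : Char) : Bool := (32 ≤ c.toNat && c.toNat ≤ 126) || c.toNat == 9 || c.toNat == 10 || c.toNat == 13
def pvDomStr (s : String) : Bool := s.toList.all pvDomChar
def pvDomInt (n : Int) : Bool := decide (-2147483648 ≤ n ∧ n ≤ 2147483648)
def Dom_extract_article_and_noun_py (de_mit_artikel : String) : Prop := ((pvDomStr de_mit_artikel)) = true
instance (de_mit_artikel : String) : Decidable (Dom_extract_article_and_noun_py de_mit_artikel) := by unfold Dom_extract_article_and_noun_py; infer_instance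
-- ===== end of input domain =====

-- B replaces A's loop over lower-cased 4-char article prefixes by a partition at the
-- first space plus one membership test of the lower-cased first token (idiomatic).

-- ===== PORT A =====
-- _ARTICLE_PREFIXES
def pvArticlePrefixes : List (List Char) :=
  [['d','e','r',' '], ['d','i','e',' '], ['d','a','s',' ']]

-- the 'for prefix in _ARTICLE_PREFIXES' loop, carrying lower and the original chars
def pvPrefixLoop (lower orig : List Char) : List (List Char) → Option (String × String)
  | [] => none
  | p :: ps =>
    if PySem.Chars.startswith lower p then
      some (String.ofList (PySem.Chars.rstrip p),
            String.ofList (PySem.List.slice orig (some (PySem.List.len p)) none))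
    else pvPrefixLoop lower orig ps

def extract_article_and_noun_py (de_mit_artikel : String) : Option (String × String) :=
  pvPrefixLoop (PySem.Chars.lower de_mit_artikel.toList) de_mit_artikel.toList pvArticlePrefixes

-- ===== PORT B =====
-- str.partition(' ') on the char list: (head, sep-found?, tail)
def pvPartitionSpace : List Char → List Char × Bool × List Char
  | [] => ([], false, [])
  | c :: cs =>
    if c = ' ' then ([], true, cs)
    else
      let r := pvPartitionSpace cs
      (c :: r.1, r.2.1, r.2.2)

def extract_article_and_noun_py_alt (de_mit_artikel : String) : Option (String × String) :=
  let r := pvPartitionSpace de_mit_artikel.toList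
  let article := PySem.Chars.lower r.1
  if r.2.1 = true ∧ article ∈ [['d','e','r'], ['d','i','e'], ['d','a','s']] then
    some (String.ofList article, String.ofList r.2.2)
  else none

-- ===== PRECONDITION & SPEC =====
def Spec_extract_article_and_noun_py (de_mit_artikel : String) (out : Option (String × String)) : Prop := out = extract_article_and_noun_py_alt de_mit_artikel
instance (de_mit_artikel : String) (out : Option (String × String)) : Decidable (Spec_extract_article_and_noun_py de_mit_artikel out) := by unfold Spec_extract_article_and_noun_py; infer_instance

-- ===== CLAIM (what is proved, stated in full; the proofs are below) =====
def Claim_equal_extract_article_and_noun_py : Prop := ∀ (de_mit_artikel : String), Dom_extract_article_and_noun_py de_mit_artikel → Spec_extract_article_and_noun_py de_mit_artikel (extract_article_and_noun_py de_mit_artikel)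

-- ===== LEMMAS AND PROOFS =====

theorem pvLowerChar_eq_space_iff (c : Char) : PySem.Chars.lowerChar c = ' ' ↔ c = ' ' := by
  unfold PySem.Chars.lowerChar PySem.Chars.isupper
  split
  · rename_i hu
    simp only [Bool.and_eq_true, decide_eq_true_eq] at hu
    have h65 : 65 ≤ c.toNat := by
      have := hu.1; rw [Char.le_def, UInt32.le_iff_toNat_le] at this; exact this
    have h90 : c.toNat ≤ 90 := by
      have := hu.2; rw [Char.le_def, UInt32.le_iff_toNat_le] at this; exact this
    constructor
    · intro h
      have h2 := congrArg Char.toNat h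
      rw [Char.toNat_ofNat] at h2
      rw [if_pos (Or.inl (by omega))] at h2
      have : (32:Nat) = ' '.toNat := by decide
      omega
    · intro h; subst h; exact absurd h65 (by decide)
  · simp

-- the two programs agree, stated over the underlying char list
set_option maxHeartbeats 1000000 in
theorem pvMain (l : List Char) :
    pvPrefixLoop (PySem.Chars.lower l) l pvArticlePrefixes =
      (let r := pvPartitionSpace l
       let article := PySem.Chars.lower r.1
       if r.2.1 = true ∧ article ∈ [['d','e','r'], ['d','i','e'], ['d','a','s']] then
         some (String.ofList article, String.ofList r.2.2)
       else none) := by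

  rcases l with _ | ⟨c1, _ | ⟨c2, _ | ⟨c3, _ | ⟨c4, rest⟩⟩⟩⟩
  · decide
  · by_cases h1 : c1 = ' ' <;>
      simp [pvPrefixLoop, pvArticlePrefixes, pvPartitionSpace, PySem.Chars.lower,
            PySem.Chars.startswith, List.isPrefixOf, PySem.Chars.lowerChar, PySem.Chars.isupper, h1]
  · by_cases h1 : c1 = ' ' <;> by_cases h2 : c2 = ' ' <;>
      simp [pvPrefixLoop, pvArticlePrefixes, pvPartitionSpace, PySem.Chars.lower,
            PySem.Chars.startswith, List.isPrefixOf, PySem.Chars.lowerChar, PySem.Chars.isupper, h1, h2]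
  · by_cases h1 : c1 = ' ' <;> by_cases h2 : c2 = ' ' <;> by_cases h3 : c3 = ' ' <;>
      simp [pvPrefixLoop, pvArticlePrefixes, pvPartitionSpace, PySem.Chars.lower,
            PySem.Chars.startswith, List.isPrefixOf, PySem.Chars.lowerChar, PySem.Chars.isupper, h1, h2, h3]
  · by_cases h1 : c1 = ' '
    · simp [pvPrefixLoop, pvArticlePrefixes, pvPartitionSpace, PySem.Chars.lower,
            PySem.Chars.startswith, List.isPrefixOf, PySem.Chars.lowerChar, PySem.Chars.isupper, h1]
    · by_cases h2 : c2 = ' '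
      · simp [pvPrefixLoop, pvArticlePrefixes, pvPartitionSpace, PySem.Chars.lower,
              PySem.Chars.startswith, List.isPrefixOf, PySem.Chars.lowerChar, PySem.Chars.isupper, h1, h2]
      · by_cases h3 : c3 = ' '
        · simp [pvPrefixLoop, pvArticlePrefixes, pvPartitionSpace, PySem.Chars.lower,
                PySem.Chars.startswith, List.isPrefixOf, PySem.Chars.lowerChar, PySem.Chars.isupper, h1, h2, h3]
        · by_cases h4 : c4 = ' '
          · subst h4
            have hpart : pvPartitionSpace (c1::c2::c3::' '::rest) = ([c1,c2,c3], true, rest) := by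
              simp [pvPartitionSpace, h1, h2, h3]
            have hslice : ∀ p : List Char, p.length = 4 →
                PySem.List.slice (c1::c2::c3::' '::rest) (some (PySem.List.len p)) none = rest := by
              intro p hp
              rw [PySem.List.len_eq, hp, PySem.List.slice_from_natCast]
              rfl
            simp only [hpart]
            simp only [pvPrefixLoop, pvArticlePrefixes, PySem.Chars.lower, List.map]
            rw [hslice _ rfl, hslice _ rfl, hslice _ rfl]
            have hsp : PySem.Chars.lowerChar ' ' = ' ' := by decide
            have hr1 : PySem.Chars.rstrip ['d','e','r',' '] = ['d','e','r'] := by decide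
            have hr2 : PySem.Chars.rstrip ['d','i','e',' '] = ['d','i','e'] := by decide
            have hr3 : PySem.Chars.rstrip ['d','a','s',' '] = ['d','a','s'] := by decide
            simp only [hr1, hr2, hr3]
            simp [PySem.Chars.startswith, List.isPrefixOf, hsp]
            split_ifs <;> simp_all [eq_comm] <;>
              first
              | tauto
              | (rename_i hA _
                 obtain ⟨e1, e2, e3⟩ := hA
                 rw [← e1, ← e2, ← e3]
                 try decide)
          · simp [pvPrefixLoop, pvArticlePrefixes, pvPartitionSpace, PySem.Chars.lower,
                  PySem.Chars.startswith, List.isPrefixOf, h1, h2, h3, h4]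
            rw [if_neg, if_neg, if_neg] <;>
              rintro ⟨-, -, -, hsp4⟩ <;>
              exact h4 ((pvLowerChar_eq_space_iff c4).mp hsp4.symm)

-- ===== VERDICT (by name: the statement is the Claim_ definition above) =====
theorem extract_article_and_noun_py_spec : Claim_equal_extract_article_and_noun_py := by
  intro s _
  unfold Spec_extract_article_and_noun_py extract_article_and_noun_py extract_article_and_noun_py_alt
  exact pvMain s.toList
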